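-- pv_equiv track=rewrite | github.com/MilianoJunior/myfunctions | helps2.py | separador
-- ===== SOURCE A (Python) =====
-- def separador(texto):
--     '''retirar palavras que não estão entre virgulas'''
--     nome = ''
--     ficha = False
--     lista = []
--     for s in texto:
--         if s == "'" and ficha:
--             ficha = False
--             if not nome in ', ':
--                 lista.append(nome)
--             nome =''
--         if ficha:
--             nome += s
--         if s == "'" and not ficha:
--             ficha = True
--     return lista
-- ===== SOURCE B (Python) =====
-- def separador(texto):
--     '''retirar palavras que não estão entre virgulas'''
--     return [w for w in texto.split("'")[1:-1] if w not in ', ']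
-- ===== Notes on version B (the rewrite author's own statement) =====
-- stated objective: faster
-- what changed: Replaced A's character-by-character state machine (toggle flag, accumulated word, repeated string concatenation) with one split on the quote character, a slice dropping the segments before the first and after the last quote, and a filter dropping separator-like segments.
import Mathlib
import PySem

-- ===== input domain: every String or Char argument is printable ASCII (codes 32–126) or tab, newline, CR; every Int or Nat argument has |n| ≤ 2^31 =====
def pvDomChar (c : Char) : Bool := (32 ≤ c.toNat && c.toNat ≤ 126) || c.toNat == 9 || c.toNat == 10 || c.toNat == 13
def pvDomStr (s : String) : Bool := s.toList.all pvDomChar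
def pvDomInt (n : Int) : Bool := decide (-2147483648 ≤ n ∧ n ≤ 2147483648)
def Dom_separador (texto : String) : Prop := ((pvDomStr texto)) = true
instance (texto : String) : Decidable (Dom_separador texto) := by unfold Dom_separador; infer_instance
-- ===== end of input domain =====

-- B replaces A's character-by-character state machine with one split on the quote char, a [1:-1] slice and a filter (same result, measured faster).


-- ===== PORT A =====
-- one iteration of A's for-loop; state = (nome, ficha, lista), nome/lista held as char lists
def stepA (st : List Char × Bool × List (List Char)) (s : Char) :
    List Char × Bool × List (List Char) :=
  let nome := st.1
  let ficha := st.2.1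
  let lista := st.2.2
  -- if s == "'" and ficha: ficha = False; if not nome in ', ': lista.append(nome); nome = ''
  let r : Bool × List (List Char) × List Char :=
    if s = '\'' && ficha then
      (false, if !(PySem.Chars.isIn nome [',', ' ']) then lista ++ [nome] else lista, [])
    else (ficha, lista, nome)
  let ficha := r.1
  let lista := r.2.1
  let nome := r.2.2
  -- if ficha: nome += s
  let nome := if ficha then nome ++ [s] else nome
  -- if s == "'" and not ficha: ficha = True
  let ficha := if s = '\'' && !ficha then true else ficha
  (nome, ficha, lista)

def separador (texto : String) : List String :=
  ((texto.toList.foldl stepA ([], false, [])).2.2).map String.ofList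

-- ===== PORT B =====
-- texto.split("'") on a single-char separator is List.splitOn on the char list
def separador_alt (texto : String) : List String :=
  ((PySem.List.slice (texto.toList.splitOn '\'') (some 1) (some (-1))).filter
    (fun w => !(PySem.Chars.isIn w [',', ' ']))).map String.ofList

-- ===== PRECONDITION & SPEC =====
def Spec_separador (texto : String) (out : List String) : Prop := out = separador_alt texto
instance (texto : String) (out : List String) : Decidable (Spec_separador texto out) := by unfold Spec_separador; infer_instance

-- ===== CLAIM (what is proved, stated in full; the proofs are below) =====
def Claim_equal_separador : Prop := ∀ (texto : String), Dom_separador texto → Spec_separador texto (separador texto)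

-- ===== LEMMAS AND PROOFS =====

-- xs[1:-1] is tail-then-dropLast
theorem slice_one_neg_one (xs : List (List Char)) :
    PySem.List.slice xs (some 1) (some (-1)) = xs.tail.dropLast := by
  simp [PySem.List.slice, PySem.List.clampIdx]
  cases xs with
  | nil => simp
  | cons x t => simp [List.dropLast_eq_take]

-- the loop with ficha = True: every quote closes (and immediately reopens) a chunk
theorem foldl_stepA_true (cs : List Char) (h : List Char) (t : List (List Char))
    (hs : List.splitOnP (fun x => x == '\'') cs = h :: t) (nome : List Char) (lista : List (List Char)) :
    (cs.foldl stepA (nome, true, lista)).2.2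
      = lista ++ (((nome ++ h) :: t).dropLast.filter (fun w => !(PySem.Chars.isIn w [',', ' ']))) := by
  induction cs generalizing h t nome lista with
  | nil =>
    rw [List.splitOnP_nil] at hs
    obtain ⟨rfl, rfl⟩ : h = [] ∧ t = [] := by simpa using hs.symm
    simp
  | cons c cs ih =>
    obtain ⟨h', t', hs'⟩ : ∃ h' t', List.splitOnP (fun x => x == '\'') cs = h' :: t' := by
      cases hcs : List.splitOnP (fun x => x == '\'') cs with
      | nil => exact absurd hcs (List.splitOnP_ne_nil _ _)
      | cons a b => exact ⟨a, b, rfl⟩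
    rw [List.splitOnP_cons] at hs
    by_cases hc : c = '\''
    · subst hc
      simp at hs
      obtain ⟨rfl, rfl⟩ := hs
      have hstep : stepA (nome, true, lista) '\''
          = ([], true, lista ++ if !(PySem.Chars.isIn nome [',', ' ']) then [nome] else []) := by
        simp [stepA]; split <;> simp
      rw [List.foldl_cons, hstep, ih _ _ hs', hs',
        List.dropLast_cons_of_ne_nil (List.cons_ne_nil _ _), List.filter_cons]
      by_cases hn : PySem.Chars.isIn nome [',', ' '] <;> simp [hn]
    · simp [hc, hs'] at hs
      obtain ⟨rfl, rfl⟩ := hs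
      have hstep : stepA (nome, true, lista) c = (nome ++ [c], true, lista) := by
        simp [stepA, hc]
      rw [List.foldl_cons, hstep, ih _ _ hs']
      simp

-- the loop with ficha = False and nome = '': nothing is collected until the first quote
theorem foldl_stepA_false (cs : List Char) (lista : List (List Char)) :
    (cs.foldl stepA ([], false, lista)).2.2
      = lista ++ ((List.splitOnP (fun x => x == '\'') cs).tail.dropLast.filter (fun w => !(PySem.Chars.isIn w [',', ' ']))) := by
  induction cs generalizing lista with
  | nil => simp [List.splitOnP_nil]
  | cons c cs ih =>
    obtain ⟨h', t', hs'⟩ : ∃ h' t', List.splitOnP (fun x => x == '\'') cs = h' :: t' := by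
      cases hcs : List.splitOnP (fun x => x == '\'') cs with
      | nil => exact absurd hcs (List.splitOnP_ne_nil _ _)
      | cons a b => exact ⟨a, b, rfl⟩
    rw [List.splitOnP_cons]
    by_cases hc : c = '\''
    · subst hc
      have hstep : stepA ([], false, lista) '\'' = ([], true, lista) := by
        simp [stepA]
      rw [List.foldl_cons, hstep, foldl_stepA_true cs h' t' hs' [] lista, hs']
      simp
    · have hstep : stepA ([], false, lista) c = ([], false, lista) := by
        simp [stepA, hc]
      rw [List.foldl_cons, hstep, ih]
      simp [hc, hs']

-- ===== VERDICT (by name: the statement is the Claim_ definition above) =====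
theorem separador_spec : Claim_equal_separador := by
  intro texto _
  unfold Spec_separador separador separador_alt
  simp only [List.splitOn]
  rw [foldl_stepA_false, slice_one_neg_one]
  cases hs : List.splitOnP (fun x => x == '\'') texto.toList with
  | nil => exact absurd hs (List.splitOnP_ne_nil _ _)
  | cons h t => simp
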